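-- pv_equiv track=rewrite | github.com/INF-1007/tp2-yasser | exercice5.py | categoriser_rapports
-- ===== SOURCE A (Python) =====
-- def analyser_rapport(texte, mots_cles):
--     """
--     Calcule le score d’un rapport et extrait les mots-clés détectés.
--
--     Étapes attendues :
--     1) Mettre le texte en minuscules
--     2) Compter les occurrences de chaque mot-clé
--        (approche simple autorisée : split() + comparaison de mots)
--     3) score = 5 + somme(occurrences * score_mot)
--     4) borner score entre 0 et 10
--     5) retourner (score, liste_mots_trouves_sans_doublons)
--
--     Args:
--         texte (str)
--         mots_cles (dict): {mot: score_int}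
--
--     Returns:
--         tuple: (score_int, mots_trouves_list)
--     """
--     score = 5
--     mots_trouves = []
--
--
--     texte = texte.lower()
--
--     mots = texte.split()
--     for i in range(len(mots)):
--         mots[i] = mots[i].strip(".,;:!?()[]{}\"'")
--     for mot_cle, score_mot in mots_cles.items():
--         occurrences = 0
--         for m in mots:
--             if m == mot_cle:
--                 occurrences += 1
--
--         score += occurrences * score_mot
--
--         if occurrences > 0 and mot_cle not in mots_trouves:
--             mots_trouves.append(mot_cle)
--
--     score = max(0, min(10, score))
--     return score, mots_trouves
--
-- def categoriser_rapports(rapports, mots_cles):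
--     """
--     Classe les rapports en 3 catégories selon leur score :
--
--     - 'positifs' : score >= 7
--     - 'neutres'  : 4 <= score <= 6
--     - 'negatifs' : score <= 3
--
--     Args:
--         rapports (list): liste de chaînes
--         mots_cles (dict)
--
--     Returns:
--         dict: {
--             'positifs': [(texte, score), ...],
--             'neutres':  [(texte, score), ...],
--             'negatifs': [(texte, score), ...]
--         }
--     """
--     categories = {'positifs': [], 'neutres': [], 'negatifs': []}
--
--
--     categories = {'positifs': [], 'neutres': [], 'negatifs': []}
--
--     for texte in rapports:
--         score, _ = analyser_rapport(texte, mots_cles)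
--
--         if score >= 7:
--             categories['positifs'].append((texte, score))
--         elif 4 <= score <= 6:
--             categories['neutres'].append((texte, score))
--         else:
--             categories['negatifs'].append((texte, score))
--
--     return categories
-- ===== SOURCE B (Python) =====
-- def categoriser_rapports(rapports, mots_cles):
--     strip_chars = ".,;:!?()[]{}\"'"
--
--     def score(texte):
--         s = 5
--         for mot in texte.lower().split():
--             v = mots_cles.get(mot.strip(strip_chars))
--             if v is not None:
--                 s += v
--         return max(0, min(10, s))
--
--     scored = [(t, score(t)) for t in rapports]
--     return {'positifs': [p for p in scored if p[1] >= 7],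
--             'neutres':  [p for p in scored if 4 <= p[1] <= 6],
--             'negatifs': [p for p in scored if p[1] <= 3]}
-- ===== Notes on version B (the rewrite author's own statement) =====
-- stated objective: faster
-- what changed: Scoring makes a single pass over the cleaned words with one dict lookup per word (no loop over mots_cles and no mots_trouves bookkeeping), and bucketing builds the scored list once and filters it per category instead of branch-appending.
import Mathlib
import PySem

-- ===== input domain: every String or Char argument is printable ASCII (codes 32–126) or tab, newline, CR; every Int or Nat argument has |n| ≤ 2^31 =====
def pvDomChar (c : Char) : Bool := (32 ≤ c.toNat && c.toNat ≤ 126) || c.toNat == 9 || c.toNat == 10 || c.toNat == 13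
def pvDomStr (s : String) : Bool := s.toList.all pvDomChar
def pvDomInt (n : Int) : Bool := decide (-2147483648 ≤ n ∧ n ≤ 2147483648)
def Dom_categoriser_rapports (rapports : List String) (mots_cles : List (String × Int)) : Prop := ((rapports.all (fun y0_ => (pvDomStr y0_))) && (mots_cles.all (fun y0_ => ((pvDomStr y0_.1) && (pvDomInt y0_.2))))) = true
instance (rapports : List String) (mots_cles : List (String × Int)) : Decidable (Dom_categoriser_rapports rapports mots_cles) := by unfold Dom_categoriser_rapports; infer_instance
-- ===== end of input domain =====

-- B scores each report in one pass over its cleaned words (one dict lookup per word) and builds the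
-- three buckets by filtering the scored list, instead of A's keyword-over-words nested loops (faster).

-- ===== PORT A =====
-- the punctuation characters stripped from each word
def pvStrip : String := ".,;:!?()[]{}\"'"

-- literal port of analyser_rapport (the python mutates `mots` in place; the map builds the same list)
def analyser_rapport (texte : String) (mots_cles : List (String × Int)) : Int × List String :=
  let texte := PySem.Str.lower texte
  let mots := PySem.Str.split₀ texte
  let mots := mots.map (fun m => PySem.Str.stripChars m pvStrip)
  let st := mots_cles.foldl (fun (acc : Int × List String) kv =>
      let occurrences : Int := (mots.count kv.1 : Int)
      let score := acc.1 + occurrences * kv.2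
      let trouves := if occurrences > 0 ∧ kv.1 ∉ acc.2 then acc.2 ++ [kv.1] else acc.2
      (score, trouves)) (5, [])
  (max 0 (min 10 st.1), st.2)

def categoriser_rapports (rapports : List String) (mots_cles : List (String × Int)) : List (String × List (String × Int)) :=
  let c := rapports.foldl (fun (c : List (String × Int) × List (String × Int) × List (String × Int)) texte =>
      let score := (analyser_rapport texte mots_cles).1
      if score ≥ 7 then (c.1 ++ [(texte, score)], c.2.1, c.2.2)
      else if 4 ≤ score ∧ score ≤ 6 then (c.1, c.2.1 ++ [(texte, score)], c.2.2)
      else (c.1, c.2.1, c.2.2 ++ [(texte, score)])) ([], [], [])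
  [("positifs", c.1), ("neutres", c.2.1), ("negatifs", c.2.2)]

-- ===== PORT B =====
-- Source B's `score`: single pass over the words, `mots_cles.get` = first-match association lookup
def pvScoreB (mots_cles : List (String × Int)) (texte : String) : Int :=
  let s := (PySem.Str.split₀ (PySem.Str.lower texte)).foldl
      (fun s w => match mots_cles.find? (fun kv => kv.1 == PySem.Str.stripChars w pvStrip) with
        | some kv => s + kv.2
        | none => s) 5
  max 0 (min 10 s)

def categoriser_rapports_alt (rapports : List String) (mots_cles : List (String × Int)) : List (String × List (String × Int)) :=
  let scored := rapports.map (fun t => (t, pvScoreB mots_cles t))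
  [("positifs", scored.filter (fun p => decide (p.2 ≥ 7))),
   ("neutres",  scored.filter (fun p => decide (4 ≤ p.2 ∧ p.2 ≤ 6))),
   ("negatifs", scored.filter (fun p => decide (p.2 ≤ 3)))]

-- ===== PRECONDITION & SPEC =====
-- Pre_ excludes association lists with duplicate keys, which do not arise from a Python dict argument.
def Pre_categoriser_rapports (rapports : List String) (mots_cles : List (String × Int)) : Prop :=
  (mots_cles.map Prod.fst).Nodup
instance (rapports : List String) (mots_cles : List (String × Int)) : Decidable (Pre_categoriser_rapports rapports mots_cles) := by unfold Pre_categoriser_rapports; infer_instance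

def pvWitness_categoriser_rapports : List String × (List (String × Int)) :=
  (["good good day!", "bad, bad bad luck", "nothing here"], [("good", 2), ("bad", -3)])

def Spec_categoriser_rapports (rapports : List String) (mots_cles : List (String × Int)) (out : List (String × List (String × Int))) : Prop := out = categoriser_rapports_alt rapports mots_cles
instance (rapports : List String) (mots_cles : List (String × Int)) (out : List (String × List (String × Int))) : Decidable (Spec_categoriser_rapports rapports mots_cles out) := by unfold Spec_categoriser_rapports; infer_instance

-- ===== CLAIM (what is proved, stated in full; the proofs are below) =====
def Claim_equal_categoriser_rapports : Prop := ∀ (rapports : List String) (mots_cles : List (String × Int)), Dom_categoriser_rapports rapports mots_cles → Pre_categoriser_rapports rapports mots_cles → Spec_categoriser_rapports rapports mots_cles (categoriser_rapports rapports mots_cles)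

-- ===== LEMMAS AND PROOFS =====

-- A's fold: the score component is 5 plus the sum of count*weight
theorem pvA_fold_score (mots_cles : List (String × Int)) (mots : List String)
    (s : Int) (l : List String) :
    (mots_cles.foldl (fun (acc : Int × List String) kv =>
      let occurrences : Int := (mots.count kv.1 : Int)
      let score := acc.1 + occurrences * kv.2
      let trouves := if occurrences > 0 ∧ kv.1 ∉ acc.2 then acc.2 ++ [kv.1] else acc.2
      (score, trouves)) (s, l)).1
    = s + (mots_cles.map (fun kv => (mots.count kv.1 : Int) * kv.2)).sum := by
  induction mots_cles generalizing s l with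
  | nil => simp
  | cons kv rest ih =>
      simp only [List.foldl_cons, List.map_cons, List.sum_cons]
      rw [ih]
      ring

-- first-match lookup value, defaulted to 0
def pvGet0 (mots_cles : List (String × Int)) (w : String) : Int :=
  match mots_cles.find? (fun kv => kv.1 == w) with
  | some kv => kv.2
  | none => 0

theorem pvGet0_not_mem (mots_cles : List (String × Int)) (w : String)
    (h : w ∉ mots_cles.map Prod.fst) : pvGet0 mots_cles w = 0 := by
  unfold pvGet0
  rw [List.find?_eq_none.2]
  intro kv hkv hb
  exact h (List.mem_map.2 ⟨kv, hkv, by simpa using hb⟩)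

theorem pvSum_ite (ws : List String) (k : String) (v : Int) :
    (ws.map (fun w => if k = w then v else 0)).sum = (ws.count k : Int) * v := by
  induction ws with
  | nil => simp
  | cons w rest ih =>
      by_cases h : k = w
      · subst h; simp [ih]; ring
      · simp [h, Ne.symm h, ih]

-- the exchange of summation: sum over keywords of count*weight = sum over words of looked-up weight
theorem pvSum_exchange (mots_cles : List (String × Int)) (ws : List String)
    (hnd : (mots_cles.map Prod.fst).Nodup) :
    (mots_cles.map (fun kv => (ws.count kv.1 : Int) * kv.2)).sum
      = (ws.map (fun w => pvGet0 mots_cles w)).sum := by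
  induction mots_cles with
  | nil => simp [pvGet0]
  | cons kv rest ih =>
      rw [List.map_cons, List.nodup_cons] at hnd
      obtain ⟨hk, hnd'⟩ := hnd
      have hstep : ∀ w, pvGet0 (kv :: rest) w
          = pvGet0 rest w + (if kv.1 = w then kv.2 else 0) := by
        intro w
        by_cases h : kv.1 = w
        · subst h
          have hz : pvGet0 rest kv.1 = 0 := pvGet0_not_mem rest kv.1 hk
          simp [pvGet0] at hz ⊢
          simp [hz]
        · have hb : (kv.1 == w) = false := by simpa using h
          simp [pvGet0, hb, h]
      calc (((kv :: rest).map (fun kv => (ws.count kv.1 : Int) * kv.2)).sum)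
          = (ws.count kv.1 : Int) * kv.2 + (rest.map (fun kv => (ws.count kv.1 : Int) * kv.2)).sum := by simp
        _ = (ws.map (fun w => pvGet0 rest w)).sum + (ws.map (fun w => if kv.1 = w then kv.2 else 0)).sum := by
              rw [ih hnd', pvSum_ite]; ring
        _ = (ws.map (fun w => pvGet0 rest w + (if kv.1 = w then kv.2 else 0))).sum := by
              rw [← List.sum_map_add]
        _ = (ws.map (fun w => pvGet0 (kv :: rest) w)).sum := by
              exact congrArg List.sum (List.map_congr_left (fun w _ => (hstep w).symm))

-- B's fold is 5 plus the sum of looked-up weights over the cleaned words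
theorem pvB_fold (mots_cles : List (String × Int)) (ws : List String) (s : Int) :
    (ws.foldl (fun s w => match mots_cles.find? (fun kv => kv.1 == PySem.Str.stripChars w pvStrip) with
        | some kv => s + kv.2
        | none => s) s)
    = s + (ws.map (fun w => pvGet0 mots_cles (PySem.Str.stripChars w pvStrip))).sum := by
  induction ws generalizing s with
  | nil => simp
  | cons w rest ih =>
      simp only [List.foldl_cons, List.map_cons, List.sum_cons, ih]
      unfold pvGet0
      cases mots_cles.find? (fun kv => kv.1 == PySem.Str.stripChars w pvStrip) <;> simp <;> ring

-- per-report scores agree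
theorem pvScore_eq (texte : String) (mots_cles : List (String × Int))
    (hnd : (mots_cles.map Prod.fst).Nodup) :
    (analyser_rapport texte mots_cles).1 = pvScoreB mots_cles texte := by
  unfold analyser_rapport pvScoreB
  simp only [pvA_fold_score, pvB_fold]
  rw [pvSum_exchange mots_cles _ hnd]
  rw [List.map_map]
  rfl

-- the branch-appending fold over the reports equals the three filters of the scored list
theorem pvBucket (g : String → Int) (rapports : List String)
    (a b c : List (String × Int)) :
    (rapports.foldl (fun (acc : List (String × Int) × List (String × Int) × List (String × Int)) texte =>
      let score := g texte
      if score ≥ 7 then (acc.1 ++ [(texte, score)], acc.2.1, acc.2.2)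
      else if 4 ≤ score ∧ score ≤ 6 then (acc.1, acc.2.1 ++ [(texte, score)], acc.2.2)
      else (acc.1, acc.2.1, acc.2.2 ++ [(texte, score)])) (a, b, c))
    = (a ++ (rapports.map (fun t => (t, g t))).filter (fun p => decide (p.2 ≥ 7)),
       b ++ (rapports.map (fun t => (t, g t))).filter (fun p => decide (4 ≤ p.2 ∧ p.2 ≤ 6)),
       c ++ (rapports.map (fun t => (t, g t))).filter (fun p => decide (p.2 ≤ 3))) := by
  induction rapports generalizing a b c with
  | nil => simp
  | cons t rest ih =>
      simp only [List.foldl_cons, List.map_cons, List.filter_cons, decide_eq_true_eq]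
      split_ifs with h1 h2 h3 h4 h5 <;>
        first
          | omega
          | (rw [ih]; simp [List.append_assoc])

-- ===== VERDICT (by name: the statement is the Claim_ definition above) =====
theorem categoriser_rapports_spec : Claim_equal_categoriser_rapports := by
  intro rapports mots_cles _ hnd
  unfold Spec_categoriser_rapports categoriser_rapports categoriser_rapports_alt
  rw [pvBucket (fun t => (analyser_rapport t mots_cles).1) rapports [] [] []]
  have hmap : rapports.map (fun t => (t, (analyser_rapport t mots_cles).1))
      = rapports.map (fun t => (t, pvScoreB mots_cles t)) :=
    List.map_congr_left (fun t _ => by rw [pvScore_eq t mots_cles hnd])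
  simp [hmap]
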